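-- pv_equiv track=rewrite | github.com/amsm/am_confusion_matrix | confusion_matrix2.py | confusion_matrix_get_TNs
-- ===== SOURCE A (Python) =====
-- def confusion_matrix_get_TNs(p_cm: dict, p_dataset):
--     """
--     Calculate True Negatives (TNs) for each class in the confusion matrix.
--
--     :param p_cm: Dictionary representing the confusion matrix with keys as tuples (row, col) and values as counts.
--     :param p_dataset: List of actual class labels present in the dataset.
--     :return: Dictionary with TN values for each class.
--     """
--     TNs = dict()
--     classes = list(sorted(set(p_dataset)))
--     how_many_different_classes = len(classes)
--
--     for class_id in range(how_many_different_classes):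
--         TN_KEY = f"TN ({classes[class_id]})"
--         TNs[TN_KEY] = 0
--         for row_id in range(how_many_different_classes):
--             for col_id in range(how_many_different_classes):
--                 # Check if the cell is not in the row or column of the target class
--                 if row_id != class_id and col_id != class_id:
--                     current_address = (row_id, col_id)
--                     cell_value = p_cm.get(current_address, 0)  # Use .get to handle missing keys
--                     TNs[TN_KEY] += cell_value
--                 # if
--             # for
--         # for
--     # for
--
--     return TNs
-- ===== SOURCE B (Python) =====
-- def confusion_matrix_get_TNs(p_cm: dict, p_dataset):
--     """Inclusion-exclusion: TN(i) = total - row_i - col_i + diagonal_i.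
--
--     One O(n^2) pass for the grand total, then O(n) row/column sums per class,
--     instead of A's O(n^3) triple loop.
--     """
--     classes = sorted(set(p_dataset))
--     n = len(classes)
--     total = sum(p_cm.get((r, c), 0) for r in range(n) for c in range(n))
--     TNs = dict()
--     for i, cls in enumerate(classes):
--         row = sum(p_cm.get((i, c), 0) for c in range(n))
--         col = sum(p_cm.get((r, i), 0) for r in range(n))
--         TNs[f"TN ({cls})"] = total - row - col + p_cm.get((i, i), 0)
--     return TNs
-- ===== Notes on version B (the rewrite author's own statement) =====
-- stated objective: faster
-- what changed: Replaces A's triple nested loop (for each class, re-scan the whole matrix skipping its row and column) by inclusion-exclusion: one grand total over the n x n grid computed once, then per class TN = total - row sum - column sum + diagonal cell.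
import Mathlib
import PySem

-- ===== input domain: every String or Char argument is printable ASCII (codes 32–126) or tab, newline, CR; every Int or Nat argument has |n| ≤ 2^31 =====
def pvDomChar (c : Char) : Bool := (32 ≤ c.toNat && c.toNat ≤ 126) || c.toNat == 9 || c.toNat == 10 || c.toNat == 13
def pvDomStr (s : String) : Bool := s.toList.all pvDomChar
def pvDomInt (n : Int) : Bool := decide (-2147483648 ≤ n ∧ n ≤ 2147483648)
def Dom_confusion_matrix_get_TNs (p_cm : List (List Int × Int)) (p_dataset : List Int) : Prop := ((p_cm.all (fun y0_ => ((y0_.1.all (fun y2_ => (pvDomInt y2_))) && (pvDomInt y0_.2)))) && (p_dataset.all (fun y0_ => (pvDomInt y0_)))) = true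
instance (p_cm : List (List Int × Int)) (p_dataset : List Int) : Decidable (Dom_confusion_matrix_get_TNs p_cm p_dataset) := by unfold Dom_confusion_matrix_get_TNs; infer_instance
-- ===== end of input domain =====

-- B replaces A's per-class O(n^3) triple loop by inclusion-exclusion (total - row - col + diagonal), O(n^2).


-- ===== PORT A =====
def confusion_matrix_get_TNs (p_cm : List (List Int × Int)) (p_dataset : List Int) : List (String × Int) :=
  let cm := PySem.Dict.ofList p_cm
  let TNs : PySem.Dict String Int := PySem.Dict.empty
  let classes := PySem.List.sorted (PySem.Set.ofList p_dataset) (fun x => x) false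
  let how_many_different_classes : Int := PySem.List.len classes
  let TNs := (PySem.List.pyRange 0 how_many_different_classes 1).foldl (fun TNs class_id =>
      let tnKey := "TN (" ++ PySem.Int.toStr (PySem.List.pyGetD classes class_id 0) ++ ")"
      let TNs := TNs.insert tnKey 0
      (PySem.List.pyRange 0 how_many_different_classes 1).foldl (fun TNs row_id =>
        (PySem.List.pyRange 0 how_many_different_classes 1).foldl (fun TNs col_id =>
          if row_id ≠ class_id ∧ col_id ≠ class_id then
            TNs.insert tnKey (TNs.getD tnKey 0 + cm.getD [row_id, col_id] 0)
          else TNs) TNs) TNs) TNs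
  TNs.items

-- ===== PORT B =====
def confusion_matrix_get_TNs_alt (p_cm : List (List Int × Int)) (p_dataset : List Int) : List (String × Int) :=
  let cm := PySem.Dict.ofList p_cm
  let classes := PySem.List.sorted (PySem.Set.ofList p_dataset) (fun x => x) false
  let n : Int := PySem.List.len classes
  let total := ((PySem.List.pyRange 0 n 1).map (fun r =>
      ((PySem.List.pyRange 0 n 1).map (fun c => cm.getD [r, c] 0)).sum)).sum
  let TNs := (PySem.List.enumerate classes 0).foldl (fun TNs p =>
      let row := ((PySem.List.pyRange 0 n 1).map (fun c => cm.getD [p.1, c] 0)).sum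
      let col := ((PySem.List.pyRange 0 n 1).map (fun r => cm.getD [r, p.1] 0)).sum
      TNs.insert ("TN (" ++ PySem.Int.toStr p.2 ++ ")") (total - row - col + cm.getD [p.1, p.1] 0))
    (PySem.Dict.empty : PySem.Dict String Int)
  TNs.items

-- ===== PRECONDITION & SPEC =====
def Spec_confusion_matrix_get_TNs (p_cm : List (List Int × Int)) (p_dataset : List Int) (out : List (String × Int)) : Prop := out = confusion_matrix_get_TNs_alt p_cm p_dataset
instance (p_cm : List (List Int × Int)) (p_dataset : List Int) (out : List (String × Int)) : Decidable (Spec_confusion_matrix_get_TNs p_cm p_dataset out) := by unfold Spec_confusion_matrix_get_TNs; infer_instance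

-- ===== CLAIM (what is proved, stated in full; the proofs are below) =====
def Claim_equal_confusion_matrix_get_TNs : Prop := ∀ (p_cm : List (List Int × Int)) (p_dataset : List Int), Dom_confusion_matrix_get_TNs p_cm p_dataset → Spec_confusion_matrix_get_TNs p_cm p_dataset (confusion_matrix_get_TNs p_cm p_dataset)

-- ===== LEMMAS AND PROOFS =====

-- sum of a pointwise difference splits
theorem pv_sum_map_sub (R : List Int) (a b : Int → Int) :
    (R.map (fun r => a r - b r)).sum = (R.map a).sum - (R.map b).sum := by
  induction R with
  | nil => simp
  | cons x T ih => simp [ih]; ring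

-- if i does not occur, the ≠-guard is vacuous
theorem pv_sum_ite_ne_of_not_mem (R : List Int) (i : Int) (f : Int → Int) (h : i ∉ R) :
    (R.map (fun x => if x ≠ i then f x else 0)).sum = (R.map f).sum := by
  induction R with
  | nil => rfl
  | cons x T ih =>
      simp only [List.mem_cons, not_or] at h
      rw [List.map_cons, List.map_cons, List.sum_cons, List.sum_cons,
        if_pos (show x ≠ i from fun e => h.1 e.symm), ih h.2]

-- dropping exactly the term at i from a Nodup list containing i
theorem pv_sum_ite_ne (R : List Int) (i : Int) (f : Int → Int)
    (hnd : R.Nodup) (hi : i ∈ R) :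
    (R.map (fun x => if x ≠ i then f x else 0)).sum = (R.map f).sum - f i := by
  induction R with
  | nil => cases hi
  | cons x T ih =>
      rcases List.mem_cons.mp hi with hxi | hiT
      · subst hxi
        rw [List.map_cons, List.sum_cons, if_neg (fun h' => h' rfl),
          pv_sum_ite_ne_of_not_mem T i f (List.nodup_cons.mp hnd).1,
          List.map_cons, List.sum_cons]
        ring
      · have hx : x ≠ i := fun e => (List.nodup_cons.mp hnd).1 (by rw [e]; exact hiT)
        rw [List.map_cons, List.map_cons, List.sum_cons, List.sum_cons, if_pos hx,
          ih (List.nodup_cons.mp hnd).2 hiT]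
        ring

-- a loop 'if p x: d[k] += f x' over L, started on d.insert k v, adds the guarded sum
theorem pv_foldl_insert_add {α : Type} (k : String) (p : α → Prop) [DecidablePred p]
    (f : α → Int) (L : List α) :
    ∀ (d : PySem.Dict String Int) (v : Int),
      L.foldl (fun d x => if p x then d.insert k (d.getD k 0 + f x) else d) (d.insert k v)
        = d.insert k (v + (L.map (fun x => if p x then f x else 0)).sum) := by
  induction L with
  | nil => intro d v; simp
  | cons x T ih =>
      intro d v
      by_cases hx : p x
      · simp only [List.foldl_cons, if_pos hx, PySem.Dict.getD_insert_self,
          PySem.Dict.insert_insert_self]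
        rw [ih d (v + f x)]
        simp [hx]; ring_nf
      · simp only [List.foldl_cons, if_neg hx]
        rw [ih d v]
        simp [hx]

-- the double loop over rows and columns, started on d.insert k v
theorem pv_foldl_rows (k : String) (P : Int → Int → Prop) [∀ r c, Decidable (P r c)]
    (g : Int → Int → Int) (CL : List Int) (RL : List Int) :
    ∀ (d : PySem.Dict String Int) (v : Int),
      RL.foldl (fun d r =>
          CL.foldl (fun d c =>
            if P r c then d.insert k (d.getD k 0 + g r c) else d) d)
        (d.insert k v)
        = d.insert k (v + (RL.map (fun r =>
            (CL.map (fun c => if P r c then g r c else 0)).sum)).sum) := by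
  induction RL with
  | nil => intro d v; simp
  | cons r T ih =>
      intro d v
      simp only [List.foldl_cons]
      rw [pv_foldl_insert_add k (P r) (g r) CL d v, ih d _]
      simp [add_assoc]

-- the inclusion–exclusion identity for the guarded double sum
theorem pv_incl_excl (R : List Int) (i : Int) (g : Int → Int → Int)
    (hnd : R.Nodup) (hi : i ∈ R) :
    (R.map (fun r => (R.map (fun c => if r ≠ i ∧ c ≠ i then g r c else 0)).sum)).sum
      = (R.map (fun r => (R.map (fun c => g r c)).sum)).sum
        - (R.map (fun c => g i c)).sum - (R.map (fun r => g r i)).sum + g i i := by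
  have hrow : ∀ r : Int, (R.map (fun c => if r ≠ i ∧ c ≠ i then g r c else 0)).sum
      = if r ≠ i then (R.map (fun c => if c ≠ i then g r c else 0)).sum else 0 := by
    intro r
    by_cases hr : r ≠ i
    · simp [hr]
    · simp [hr]
  calc (R.map (fun r => (R.map (fun c => if r ≠ i ∧ c ≠ i then g r c else 0)).sum)).sum
      = (R.map (fun r => if r ≠ i then (R.map (fun c => if c ≠ i then g r c else 0)).sum else 0)).sum := by
        exact congrArg _ (List.map_congr_left (fun r _ => hrow r))
    _ = (R.map (fun r => (R.map (fun c => if c ≠ i then g r c else 0)).sum)).sum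
          - (R.map (fun c => if c ≠ i then g i c else 0)).sum :=
        pv_sum_ite_ne R i _ hnd hi
    _ = (R.map (fun r => (R.map (fun c => g r c)).sum - g r i)).sum
          - ((R.map (fun c => g i c)).sum - g i i) := by
        rw [pv_sum_ite_ne R i _ hnd hi]
        congr 1
        exact congrArg _ (List.map_congr_left (fun r _ => pv_sum_ite_ne R i (g r) hnd hi))
    _ = (R.map (fun r => (R.map (fun c => g r c)).sum)).sum
          - (R.map (fun c => g i c)).sum - (R.map (fun r => g r i)).sum + g i i := by
        rw [pv_sum_map_sub R (fun r => (R.map (fun c => g r c)).sum) (fun r => g r i)]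
        ring

-- ===== VERDICT (by name: the statement is the Claim_ definition above) =====
theorem confusion_matrix_get_TNs_spec : Claim_equal_confusion_matrix_get_TNs := by
  intro p_cm p_dataset _
  unfold Spec_confusion_matrix_get_TNs confusion_matrix_get_TNs confusion_matrix_get_TNs_alt
  simp only []
  set cm := PySem.Dict.ofList p_cm with hcm
  set classes := PySem.List.sorted (PySem.Set.ofList p_dataset) (fun x => x) false with hcls
  set n : Int := PySem.List.len classes with hn
  rw [PySem.List.enumerate_eq_map_pyRange classes 0, List.foldl_map]
  rw [show PySem.List.len classes = n from rfl]
  apply congrArg PySem.Dict.items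
  apply PySem.List.foldl_congr_mem
  intro d i hi
  have hnd : (PySem.List.pyRange 0 n 1).Nodup := PySem.List.nodup_pyRange_one 0 n
  rw [pv_foldl_rows ("TN (" ++ PySem.Int.toStr (PySem.List.pyGetD classes i 0) ++ ")")
        (fun r c => r ≠ i ∧ c ≠ i) (fun r c => cm.getD [r, c] 0) _ _ d 0]
  rw [pv_incl_excl (PySem.List.pyRange 0 n 1) i (fun r c => cm.getD [r, c] 0) hnd hi]
  ring_nf
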